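-- pv_equiv track=rewrite | github.com/RickSlick3/CS2021-PythonProgramming | ClassNotes/Week5Notes.py | s_table
-- ===== SOURCE A (Python) =====
-- def s_table(seq):
--     table = {}
--     for x in seq:
--         table[x] = []
--     prev = seq[0]
--     for x in seq[1:]:
--         if x not in table[prev]:
--             table[prev] += [x]
--         prev = x
--     return table
-- ===== SOURCE B (Python) =====
-- def s_table(seq):
--     succs_of = {}
--     for a, b in zip(seq, seq[1:]):
--         succs_of.setdefault(a, []).append(b)
--     table = {}
--     for x in seq:
--         if x not in table:
--             succs = []
--             for b in succs_of.get(x, []):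
--                 if b not in succs:
--                     succs.append(b)
--             table[x] = succs
--     return table
-- ===== Notes on version B (the rewrite author's own statement) =====
-- stated objective: alternative
-- what changed: B replaces A's single stateful pass that dedup-appends to table[prev] with staged passes over the materialised adjacency pairs: group every successor by its predecessor into buckets first, then for each first occurrence of a key deduplicate its precomputed bucket; no prev-threading and no membership test against a growing table entry during the scan.
import Mathlib
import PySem

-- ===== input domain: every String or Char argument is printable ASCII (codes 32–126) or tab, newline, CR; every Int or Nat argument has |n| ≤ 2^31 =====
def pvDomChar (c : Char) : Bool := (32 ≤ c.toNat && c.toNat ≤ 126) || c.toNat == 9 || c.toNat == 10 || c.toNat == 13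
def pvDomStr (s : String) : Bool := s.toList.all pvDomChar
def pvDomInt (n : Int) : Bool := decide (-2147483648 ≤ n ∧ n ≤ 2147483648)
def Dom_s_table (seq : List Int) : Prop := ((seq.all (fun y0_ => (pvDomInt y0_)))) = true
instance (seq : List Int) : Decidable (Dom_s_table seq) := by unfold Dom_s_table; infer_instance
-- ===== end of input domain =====

-- B builds the adjacency pairs once and, per distinct key, scans them for that key's
-- deduplicated successors, instead of A's stateful single pass mutating table[prev];
-- equal return values on nonempty seq (A raises IndexError on the empty list).

-- ===== PORT A =====
-- for x in seq: table[x] = []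
def pvInitA (seq : List Int) : PySem.Dict Int (List Int) :=
  seq.foldl (fun d x => d.insert x ([] : List Int)) PySem.Dict.empty

-- one iteration of A's loop body over state (table, prev)
def pvStepA (st : PySem.Dict Int (List Int) × Int) (x : Int) :
    PySem.Dict Int (List Int) × Int :=
  let cur := st.1.getD st.2 []        -- table[prev] (key always present)
  (if x ∈ cur then st.1 else st.1.insert st.2 (cur ++ [x]), x)

def s_table (seq : List Int) : List (Int × List Int) :=
  match seq with
  | [] => []                           -- Python raises IndexError here (excluded by Pre_)
  | p0 :: rest =>                      -- prev = seq[0]; seq[1:] = rest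
      ((rest.foldl pvStepA (pvInitA (p0 :: rest), p0)).1).items

-- ===== PORT B =====
-- for a, b in zip(seq, seq[1:]): succs_of.setdefault(a, []).append(b)
def pvGroupB (pairs : List (Int × Int)) : PySem.Dict Int (List Int) :=
  pairs.foldl (fun d p => d.modify p.1 [] (· ++ [p.2])) PySem.Dict.empty

-- for b in succs_of.get(x, []): if b not in succs: succs.append(b)
def pvDedupB (bs : List Int) : List Int :=
  bs.foldl (fun s b => if b ∉ s then s ++ [b] else s) []

def s_table_alt (seq : List Int) : List (Int × List Int) :=
  let g := pvGroupB (seq.zip (seq.drop 1))   -- zip(seq, seq[1:])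
  (seq.foldl
    (fun t x => if t.contains x then t else t.insert x (pvDedupB (g.getD x [])))
    PySem.Dict.empty).items

-- ===== PRECONDITION & SPEC =====
-- Pre_ excludes only the empty list, on which A raises IndexError (seq[0]).
def Pre_s_table (seq : List Int) : Prop := seq ≠ []
instance (seq : List Int) : Decidable (Pre_s_table seq) := by unfold Pre_s_table; infer_instance
def pvWitness_s_table : List Int := [1, 2, 1, 3]

def Spec_s_table (seq : List Int) (out : List (Int × List Int)) : Prop := out = s_table_alt seq
instance (seq : List Int) (out : List (Int × List Int)) : Decidable (Spec_s_table seq out) := by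
  unfold Spec_s_table; infer_instance

-- ===== CLAIM (what is proved, stated in full; the proofs are below) =====
def Claim_equal_s_table : Prop :=
  ∀ (seq : List Int), Dom_s_table seq → Pre_s_table seq → Spec_s_table seq (s_table seq)

-- ===== LEMMAS AND PROOFS =====

-- A's pair-step: the loop body of A seen as a function of the adjacent pair (prev, x)
def pvStep2 (d : PySem.Dict Int (List Int)) (q : Int × Int) : PySem.Dict Int (List Int) :=
  let cur := d.getD q.1 []
  if q.2 ∈ cur then d else d.insert q.1 (cur ++ [q.2])

-- B's inner fold started from an arbitrary accumulator
def pvSuccFrom (acc : List Int) (pairs : List (Int × Int)) (k : Int) : List Int :=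
  pairs.foldl (fun s q => if q.1 = k ∧ q.2 ∉ s then s ++ [q.2] else s) acc

-- B's inner fold over all pairs restricted to a key is its fold over that key's bucket
theorem pvSuccFrom_filter (pairs : List (Int × Int)) (acc : List Int) (k : Int) :
    pvSuccFrom acc pairs k
      = ((pairs.filter (fun p => p.1 == k)).map (·.2)).foldl
          (fun s b => if b ∉ s then s ++ [b] else s) acc := by
  induction pairs generalizing acc with
  | nil => rfl
  | cons q ps ih =>
      show pvSuccFrom (if q.1 = k ∧ q.2 ∉ acc then acc ++ [q.2] else acc) ps k = _
      rw [ih]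
      by_cases hq : q.1 = k
      · simp [List.foldl_cons, hq]
      · simp [hq]

-- A's stateful loop is the fold of pvStep2 over the adjacency pairs
theorem pvA_as_pairs (rest : List Int) (d : PySem.Dict Int (List Int)) (p0 : Int) :
    (rest.foldl pvStepA (d, p0)).1 = ((p0 :: rest).zip rest).foldl pvStep2 d := by
  induction rest generalizing d p0 with
  | nil => rfl
  | cons x rs ih =>
      simp only [List.zip_cons_cons, List.foldl_cons]
      exact ih _ x

theorem pvInit_values (seq : List Int) (d : PySem.Dict Int (List Int))
    (h : ∀ p ∈ d.items, p.2 = ([] : List Int)) :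
    ∀ p ∈ (seq.foldl (fun d x => d.insert x ([] : List Int)) d).items, p.2 = ([] : List Int) := by
  induction seq generalizing d with
  | nil => simpa using h
  | cons x rest ih =>
      simp only [List.foldl_cons]
      refine ih _ ?_
      intro p hp
      rcases (PySem.Dict.mem_items_insert _ _ _ _).1 hp with h1 | h2
      · simp [h1]
      · exact h p h2.1

theorem pvInitA_nodup (seq : List Int) : (pvInitA seq).keys.Nodup := by
  unfold pvInitA
  exact PySem.Dict.nodup_keys_foldl_insert _ _ _ PySem.Dict.nodup_keys_empty

theorem pvInitA_contains (seq : List Int) (y : Int) (hy : y ∈ seq) :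
    (pvInitA seq).contains y = true := by
  unfold pvInitA
  rw [PySem.Dict.contains_iff_mem_keys, PySem.Dict.keys_foldl_insert]
  simp [PySem.Set.mem_update, PySem.Dict.keys_empty, hy]

-- Main lemma: folding A's pair-step over the pairs rewrites every bucket by B's inner fold
theorem pvPairs_fold (pairs : List (Int × Int)) (d : PySem.Dict Int (List Int))
    (hnd : d.keys.Nodup) (hk : ∀ q ∈ pairs, d.contains q.1 = true) :
    (pairs.foldl pvStep2 d).items
      = d.items.map (fun p => (p.1, pvSuccFrom p.2 pairs p.1)) := by
  induction pairs generalizing d with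
  | nil =>
      simp [pvSuccFrom]
  | cons q ps ih =>
      obtain ⟨a, b⟩ := q
      have hca : d.contains a = true := hk (a, b) (by simp)
      simp only [List.foldl_cons]
      by_cases hb : b ∈ d.getD a []
      · have hstep : pvStep2 d (a, b) = d := by simp [pvStep2, hb]
        rw [hstep, ih d hnd (fun q hq => hk q (by simp [hq]))]
        apply List.map_congr_left
        intro p hp
        congr 1
        show pvSuccFrom p.2 ps p.1 = pvSuccFrom p.2 ((a, b) :: ps) p.1
        unfold pvSuccFrom
        simp only [List.foldl_cons]
        congr 1
        by_cases hpa : a = p.1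
        · have hv : d.getD a [] = p.2 := by
            rw [hpa]
            exact PySem.Dict.getD_of_mem_items _ hp hnd []
          rw [if_neg]
          rintro ⟨-, hnb⟩
          exact hnb (hv ▸ hb)
        · rw [if_neg]; rintro ⟨h1, -⟩; exact hpa h1
      · have hstep : pvStep2 d (a, b) = d.insert a (d.getD a [] ++ [b]) := by
          simp [pvStep2, hb]
        rw [hstep]
        have hnd' := PySem.Dict.nodup_keys_insert d a (d.getD a [] ++ [b]) hnd
        have hk' : ∀ q ∈ ps, (d.insert a (d.getD a [] ++ [b])).contains q.1 = true := by
          intro q hq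
          rw [PySem.Dict.contains_insert]
          simp [hk q (by simp [hq])]
        rw [ih _ hnd' hk', PySem.Dict.items_insert_of_contains _ _ hca, List.map_map]
        apply List.map_congr_left
        intro p hp
        by_cases hpa : p.1 = a
        · have hv : p.2 = d.getD a [] := by
            rw [← hpa]
            exact (PySem.Dict.getD_of_mem_items _ hp hnd []).symm
          have hbeq : (p.1 == a) = true := by simp [hpa]
          simp only [Function.comp, hbeq, if_pos]
          show (a, pvSuccFrom (d.getD a [] ++ [b]) ps a) = (p.1, pvSuccFrom p.2 ((a, b) :: ps) p.1)
          rw [hpa, hv]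
          unfold pvSuccFrom
          simp only [List.foldl_cons]
          simp [hb]
        · have hbeq : (p.1 == a) = false := by simp [hpa]
          simp only [Function.comp, hbeq, if_neg, Bool.false_eq_true, not_false_iff]
          congr 1
          show pvSuccFrom p.2 ps p.1 = pvSuccFrom p.2 ((a, b) :: ps) p.1
          unfold pvSuccFrom
          simp only [List.foldl_cons]
          rw [if_neg]
          rintro ⟨h1, -⟩
          exact hpa h1.symm

-- Mapping f over A's init-dict equals B's first-occurrence loop with values f x
theorem pvInit_vs_skel (seq : List Int) (f : Int → List Int)
    (d d' : PySem.Dict Int (List Int))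
    (h0 : ∀ p ∈ d.items, p.2 = ([] : List Int))
    (h1 : d'.items = d.items.map (fun p => (p.1, f p.1))) :
    (seq.foldl (fun d x => d.insert x ([] : List Int)) d).items.map (fun p => (p.1, f p.1))
      = (seq.foldl (fun t x => if t.contains x then t else t.insert x (f x)) d').items := by
  induction seq generalizing d d' with
  | nil => exact h1.symm
  | cons x rest ih =>
      have hkeys : d'.keys = d.keys := by
        show d'.items.map Prod.fst = d.items.map Prod.fst
        rw [h1, List.map_map]; rfl
      have hcontains : d'.contains x = d.contains x := by
        rw [PySem.Dict.contains_eq_decide_mem_keys, PySem.Dict.contains_eq_decide_mem_keys, hkeys]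
      simp only [List.foldl_cons]
      by_cases hc : d.contains x = true
      · have hid : d.insert x ([] : List Int) = d := by
          apply PySem.Dict.ext
          rw [PySem.Dict.items_insert_of_contains _ _ hc]
          have hmid : List.map (fun p => if (p.1 == x) = true then (x, ([] : List Int)) else p) d.items
              = List.map id d.items := by
            apply List.map_congr_left
            intro p hp
            by_cases hpx : p.1 == x
            · have h2 := h0 p hp
              obtain ⟨p1, p2⟩ := p
              simp_all
            · simp [hpx]
          simpa using hmid
        rw [hid, hcontains, hc, if_pos rfl]
        exact ih d d' h0 h1
      · have hc' : d.contains x = false := by simpa using hc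
        rw [hcontains, hc', if_neg (by simp)]
        refine ih _ _ ?_ ?_
        · intro p hp
          rcases (PySem.Dict.mem_items_insert _ _ _ _).1 hp with h2 | h2
          · simp [h2]
          · exact h0 p h2.1
        · rw [PySem.Dict.items_insert_of_not_contains _ _ hc',
              PySem.Dict.items_insert_of_not_contains _ _ (by rw [hcontains]; exact hc'),
              List.map_append, h1]
          rfl

-- ===== VERDICT (by name: the statements are the Claim_ definitions above) =====
theorem s_table_spec : Claim_equal_s_table := by
  intro seq _ hpre
  unfold Spec_s_table
  match seq with
  | [] => exact absurd rfl hpre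
  | p0 :: rest =>
      show ((rest.foldl pvStepA (pvInitA (p0 :: rest), p0)).1).items = _
      rw [pvA_as_pairs]
      rw [pvPairs_fold _ _ (pvInitA_nodup _) ?hk]
      case hk =>
        intro q hq
        exact pvInitA_contains _ _ (List.of_mem_zip hq).1
      have hf : ∀ x, pvDedupB ((pvGroupB ((p0 :: rest).zip rest)).getD x [])
          = pvSuccFrom [] ((p0 :: rest).zip rest) x := by
        intro x
        have hg : (pvGroupB ((p0 :: rest).zip rest)).getD x []
            = (((p0 :: rest).zip rest).filter (fun p => p.1 == x)).map (·.2) := by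
          unfold pvGroupB
          rw [PySem.Dict.getD_foldl_modify_append]
          simp
        rw [hg]
        exact (pvSuccFrom_filter _ [] x).symm
      have hmap : (pvInitA (p0 :: rest)).items.map
            (fun p => (p.1, pvSuccFrom p.2 ((p0 :: rest).zip rest) p.1))
          = (pvInitA (p0 :: rest)).items.map
            (fun p => (p.1, pvDedupB ((pvGroupB ((p0 :: rest).zip rest)).getD p.1 []))) := by
        apply List.map_congr_left
        intro p hp
        have hz := pvInit_values (p0 :: rest) PySem.Dict.empty (by intro p hp; cases hp) p hp
        rw [hf p.1, hz]
      rw [hmap]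
      exact pvInit_vs_skel (p0 :: rest)
        (fun x => pvDedupB ((pvGroupB ((p0 :: rest).zip rest)).getD x []))
        PySem.Dict.empty PySem.Dict.empty (by intro p hp; cases hp) rfl
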